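-- pv_equiv track=rewrite | github.com/seonghun0828/ProblemSolving | 프로그래머스/lv2/60057. 문자열 압축/문자열 압축.py | get_compression_length
-- ===== SOURCE A (Python) =====
-- def get_compression_length(s, k):  # 문자열 s를 k로 나눠 압축한 문자열의 길이 반환
--     compressed = ""  # 압축한 문자열
--     prev = ""  # 이전 문자열
--     prev_cnt = 1  # 이전 문자열이 반복된 수
--     st, ed = 0, len(s)  # st 인덱스를 0에서 시작해 k만큼 이동시키기
--
--     while st <= ed - k:  # st 인덱스는 ed - k까지만 증가
--         curr = s[st : st + k]  # 현재 인덱스 만큼 자른 문자열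
--         if prev == curr:  # 이전 문자열과 현재 문자열이 같음
--             prev_cnt += 1
--         else:  # 이전 문자열과 현재 문자열이 다름
--             # prev_cnt가 1 초과하면 압축 문자열에 반영하고 1이면 생략
--             prev_cnt_str = str(prev_cnt) if prev_cnt > 1 else ""
--             compressed += prev_cnt_str + prev
--             prev = curr
--             prev_cnt = 1
--         st += k
--
--     # s 끝까지 문자열이 반복된 경우 아직 추가 안된 prev를 압축 문자열에 반영
--     prev_cnt_str = str(prev_cnt) if prev_cnt > 1 else ""
--     compressed += prev_cnt_str + prev
--     compressed += s[st : ed]  # 남은 문자열이 있다면 압축 문자열에 그대로 반영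
--     return len(compressed)
-- ===== SOURCE B (Python) =====
-- def get_compression_length(s, k):
--     # Split s into k-sized chunks, then sum run-length-group contributions.
--     chunks = [s[i:i + k] for i in range(0, len(s), k)]
--     total = 0
--     while chunks:
--         head = chunks[0]
--         count = 1
--         while count < len(chunks) and chunks[count] == head:
--             count += 1
--         total += len(head) + (len(str(count)) if count > 1 else 0)
--         chunks = chunks[count:]
--     return total
-- ===== Notes on version B (the rewrite author's own statement) =====
-- stated objective: simpler
-- what changed: B first splits s into the list of k-sized chunks and then sums run-length-group contributions (chunk length plus digit count of the run length) over that list, instead of A's single scan that builds the whole compressed string with a prev/prev_cnt accumulator and measures it at the end.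
import Mathlib
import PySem

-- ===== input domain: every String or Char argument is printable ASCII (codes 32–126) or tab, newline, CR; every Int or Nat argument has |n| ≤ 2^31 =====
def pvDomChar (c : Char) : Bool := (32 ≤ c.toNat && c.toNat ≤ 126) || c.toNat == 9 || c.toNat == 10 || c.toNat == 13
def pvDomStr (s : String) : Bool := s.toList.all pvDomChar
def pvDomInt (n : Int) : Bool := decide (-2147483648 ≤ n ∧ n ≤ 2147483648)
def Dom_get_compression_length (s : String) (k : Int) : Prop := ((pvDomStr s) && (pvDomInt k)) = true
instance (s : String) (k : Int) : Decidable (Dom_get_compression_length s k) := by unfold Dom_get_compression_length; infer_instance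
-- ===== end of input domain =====

-- B replaces A's single scan that concatenates the whole compressed string through a
-- prev/prev_cnt accumulator by: split s into the list of k-sized chunks, then sum the
-- run-length-group contributions (chunk length + digit count of the run length) over that list.

-- ===== PORT A =====
-- str(prev_cnt) if prev_cnt > 1 else ""
def aCntChars (cnt : Int) : List Char :=
  if 1 < cnt then PySem.Int.toChars cnt else []

-- the while loop; state = (compressed, prev, prev_cnt, st); fuel only makes it total
def aLoop (sL : List Char) (k ed : Int) :
    Nat → List Char → List Char → Int → Int → List Char × List Char × Int × Int
  | 0, compressed, prev, cnt, st => (compressed, prev, cnt, st)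
  | fuel + 1, compressed, prev, cnt, st =>
    if st ≤ ed - k then
      let curr := PySem.List.slice sL (some st) (some (st + k))
      if prev = curr then
        aLoop sL k ed fuel compressed prev (cnt + 1) (st + k)
      else
        aLoop sL k ed fuel (compressed ++ (aCntChars cnt ++ prev)) curr 1 (st + k)
    else (compressed, prev, cnt, st)

-- the final three statements of A after the loop
def aFinalize (sL : List Char) (r : List Char × List Char × Int × Int) : Int :=
  (((r.1 ++ (aCntChars r.2.2.1 ++ r.2.1)) ++
      PySem.List.slice sL (some r.2.2.2) (some (sL.length : Int))).length : Int)

-- fuel s.length + 1 suffices for every k ≥ 1 (st advances by k each turn);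
-- for k ≤ 0 the Python loop never terminates (excluded by Pre_).
def get_compression_length (s : String) (k : Int) : Int :=
  let sL := s.toList
  aFinalize sL (aLoop sL k (sL.length : Int) (sL.length + 1) [] [] 1 0)

-- ===== PORT B =====
-- inner while: number of chunks after the head equal to the head
def bCountRun (c : List Char) : List (List Char) → Nat
  | [] => 0
  | d :: rest => if d = c then bCountRun c rest + 1 else 0

-- outer while over the chunk list
def bTotal : List (List Char) → Int
  | [] => 0
  | head :: rest =>
    ((head.length : Int) +
        (if (1 : Int) < (bCountRun head rest : Int) + 1
         then ((PySem.Int.toChars ((bCountRun head rest : Int) + 1)).length : Int) else 0))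
      + bTotal (rest.drop (bCountRun head rest))
  termination_by l => l.length
  decreasing_by simp

def get_compression_length_alt (s : String) (k : Int) : Int :=
  let sL := s.toList
  bTotal ((PySem.List.pyRange 0 (sL.length : Int) k).map
    (fun i => PySem.List.slice sL (some i) (some (i + k))))

-- ===== PRECONDITION & SPEC =====
-- Pre_ excludes k ≤ 0, where the Python A never terminates (st never passes ed - k); it admits every input A returns on.
def Pre_get_compression_length (s : String) (k : Int) : Prop := 1 ≤ k
instance (s : String) (k : Int) : Decidable (Pre_get_compression_length s k) := by
  unfold Pre_get_compression_length; infer_instance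

def pvWitness_get_compression_length : String × Int := ("aabbaccc", 2)

def Spec_get_compression_length (s : String) (k : Int) (out : Int) : Prop := out = get_compression_length_alt s k
instance (s : String) (k : Int) (out : Int) : Decidable (Spec_get_compression_length s k out) := by unfold Spec_get_compression_length; infer_instance

-- ===== CLAIM (what is proved, stated in full; the proofs are below) =====
def Claim_equal_get_compression_length : Prop := ∀ (s : String) (k : Int), Dom_get_compression_length s k → Pre_get_compression_length s k → Spec_get_compression_length s k (get_compression_length s k)

-- ===== LEMMAS AND PROOFS =====

-- length (as Int) of str(cnt)-if-cnt>1-else-"" (what A appends, what B adds for a run)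
def cLen (cnt : Int) : Int := ((aCntChars cnt).length : Int)

-- abstract emитter: A's accumulator (prev, cnt) run over a list of chunks, length only
def emit (prev : List Char) (cnt : Int) : List (List Char) → Int
  | [] => cLen cnt + (prev.length : Int)
  | c :: cs =>
    if prev = c then emit prev (cnt + 1) cs
    else cLen cnt + (prev.length : Int) + emit c 1 cs

lemma cLen_one : cLen 1 = 0 := by simp [cLen, aCntChars]

lemma pyRange_pos_nil (a b k : Int) (hk : 0 < k) (hab : b ≤ a) :
    PySem.List.pyRange a b k = [] := by
  rw [PySem.List.pyRange_of_pos _ _ hk, if_neg (by omega)]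
  simp

lemma pyRange_pos_cons (a b k : Int) (hk : 0 < k) (hab : a < b) :
    PySem.List.pyRange a b k = a :: PySem.List.pyRange (a + k) b k := by
  rw [PySem.List.pyRange_of_pos _ _ hk, PySem.List.pyRange_of_pos _ _ hk, if_pos hab]
  have hdiv : (b - a + k - 1) / k = (b - a - 1) / k + 1 := by
    have h := Int.add_mul_ediv_right (b - a - 1) 1 (by omega : k ≠ 0)
    have heq : b - a + k - 1 = b - a - 1 + 1 * k := by ring
    rw [heq, h]
  have hnn : 0 ≤ (b - a - 1) / k := Int.ediv_nonneg (by omega) (by omega)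
  have htn : ((b - a + k - 1) / k).toNat = ((b - a - 1) / k).toNat + 1 := by
    rw [hdiv]; omega
  have hM : (if a + k < b then ((b - (a + k) + k - 1) / k).toNat else 0)
      = ((b - a - 1) / k).toNat := by
    by_cases h2 : a + k < b
    · rw [if_pos h2]; congr 2; ring
    · rw [if_neg h2]
      have h0 : (b - a - 1) / k = 0 := Int.ediv_eq_zero_of_lt (by omega) (by omega)
      omega
  rw [htn, hM, List.range_succ_eq_map, List.map_cons, List.map_map]
  congr 1
  · simp
  · apply List.map_congr_left
    intro j _
    simp only [Function.comp_apply, Nat.succ_eq_add_one]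
    push_cast
    ring

lemma length_slice_full (sL : List Char) (st k : Int) (h0 : 0 ≤ st) (hk : 0 < k)
    (hende : st + k ≤ (sL.length : Int)) :
    ((PySem.List.slice sL (some st) (some (st + k))).length : Int) = k := by
  rw [PySem.List.length_slice]
  simp only [PySem.List.clampIdx]
  split_ifs <;> omega

lemma slice_tail_eq (sL : List Char) (st k : Int) (h0 : 0 ≤ st)
    (hle : (sL.length : Int) ≤ st + k) :
    PySem.List.slice sL (some st) (some (st + k)) =
      PySem.List.slice sL (some st) (some (sL.length : Int)) := by
  rw [PySem.List.slice_toNat sL h0 (by omega), PySem.List.slice_toNat sL h0 (by omega)]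
  have hlen : (List.drop st.toNat sL).length = sL.length - st.toNat := by simp
  rw [List.take_of_length_le (by omega), List.take_of_length_le (by omega)]

lemma length_slice_tail (sL : List Char) (st : Int) (h0 : 0 ≤ st) :
    ((PySem.List.slice sL (some st) (some (sL.length : Int))).length : Int)
      = max 0 ((sL.length : Int) - st) := by
  rw [PySem.List.length_slice]
  simp only [PySem.List.clampIdx]
  split_ifs <;> omega

-- B-total unfolding lemmas (bTotal is defined by well-founded recursion)
lemma bTotal_nil : bTotal [] = 0 := by unfold bTotal; rfl

lemma bTotal_cons (c : List Char) (rest : List (List Char)) :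
    bTotal (c :: rest) = ((c.length : Int) +
        (if (1 : Int) < (bCountRun c rest : Int) + 1
         then ((PySem.Int.toChars ((bCountRun c rest : Int) + 1)).length : Int) else 0))
      + bTotal (rest.drop (bCountRun c rest)) := by
  conv_lhs => unfold bTotal

-- emit started at (c, m) versus B's run grouping
lemma emit_run : ∀ (cs : List (List Char)) (c : List Char) (m : Int),
    emit c m cs = cLen (m + (bCountRun c cs : Int)) + (c.length : Int)
      + bTotal (cs.drop (bCountRun c cs))
  | [], c, m => by simp [emit, bCountRun, bTotal_nil]
  | d :: rest, c, m => by
    by_cases h : c = d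
    · subst h
      rw [emit, if_pos rfl, emit_run rest c (m + 1)]
      have hcr : bCountRun c (c :: rest) = bCountRun c rest + 1 := by simp [bCountRun]
      rw [hcr]
      have h1 : ((bCountRun c rest + 1 : Nat) : Int) = (bCountRun c rest : Int) + 1 := by
        push_cast; ring
      rw [h1]
      have h2 : m + 1 + (bCountRun c rest : Int) = m + ((bCountRun c rest : Int) + 1) := by ring
      rw [h2, List.drop_succ_cons]
    · have hdc : bCountRun c (d :: rest) = 0 := by simp [bCountRun, Ne.symm h]
      rw [emit, if_neg h, hdc, emit_run rest d 1]
      simp only [Nat.cast_zero, List.drop_zero, add_zero]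
      rw [bTotal_cons]
      have h1 : (1 : Int) + (bCountRun d rest : Int) = (bCountRun d rest : Int) + 1 := by ring
      rw [h1]
      by_cases hb : (1 : Int) < (bCountRun d rest : Int) + 1
      · rw [if_pos hb]; simp only [cLen, aCntChars, if_pos hb]; ring
      · rw [if_neg hb]; simp only [cLen, aCntChars, if_neg hb, List.length_nil, Nat.cast_zero, add_zero]; ring

-- B's loop equals emit from the initial state ([], 1) when the head chunk is nonempty
lemma bTotal_eq_emit (cs : List (List Char))
    (hhead : ∀ c ∈ cs.head?, c ≠ ([] : List Char)) :
    bTotal cs = emit [] 1 cs := by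
  cases cs with
  | nil => simp [bTotal_nil, emit, cLen_one]
  | cons c rest =>
    have hc : c ≠ ([] : List Char) := hhead c (by simp)
    rw [emit, if_neg (Ne.symm hc), cLen_one, emit_run rest c 1, bTotal_cons]
    have h1 : (1 : Int) + (bCountRun c rest : Int) = (bCountRun c rest : Int) + 1 := by ring
    rw [h1]
    simp only [List.length_nil, Nat.cast_zero, add_zero, zero_add]
    by_cases hb : (1 : Int) < (bCountRun c rest : Int) + 1
    · rw [if_pos hb]; simp only [cLen, aCntChars, if_pos hb]; ring
    · rw [if_neg hb]; simp only [cLen, aCntChars, if_neg hb, List.length_nil, Nat.cast_zero, add_zero]; ring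

-- main loop invariant: A's finalized result from any state equals the compressed length
-- so far plus emit over the chunks that remain from st
lemma aLoop_emit (sL : List Char) (k : Int) (hk : 1 ≤ k) :
    ∀ (fuel : Nat) (st : Int) (compressed prev : List Char) (cnt : Int),
      0 ≤ st → (((sL.length : Int) - st).toNat < fuel) →
      (prev = [] ∨ (prev.length : Int) = k) →
      aFinalize sL (aLoop sL k (sL.length : Int) fuel compressed prev cnt st)
        = (compressed.length : Int) +
          emit prev cnt ((PySem.List.pyRange st (sL.length : Int) k).map
            (fun i => PySem.List.slice sL (some i) (some (i + k)))) := by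
  intro fuel
  induction fuel with
  | zero => intro st _ _ _ h0 hf _; omega
  | succ fuel ih =>
    intro st compressed prev cnt h0 hf hprev
    rw [aLoop]
    by_cases hcond : st ≤ (sL.length : Int) - k
    · rw [if_pos hcond]
      have hstlt : st < (sL.length : Int) := by omega
      rw [pyRange_pos_cons st _ k (by omega) hstlt, List.map_cons]
      have hcurlen : ((PySem.List.slice sL (some st) (some (st + k))).length : Int) = k :=
        length_slice_full sL st k h0 (by omega) (by omega)
      by_cases heq : prev = PySem.List.slice sL (some st) (some (st + k))
      · simp only [if_pos heq]
        rw [ih (st + k) compressed prev (cnt + 1) (by omega) (by omega)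
          (Or.inr (by rw [heq]; exact hcurlen))]
        rw [emit, if_pos heq]
      · simp only [if_neg heq]
        rw [ih (st + k) (compressed ++ (aCntChars cnt ++ prev))
          (PySem.List.slice sL (some st) (some (st + k))) 1 (by omega) (by omega)
          (Or.inr hcurlen)]
        rw [emit, if_neg heq]
        simp only [List.length_append, cLen]
        push_cast
        ring
    · rw [if_neg hcond]
      -- loop exits: the remaining chunks are [] or the single short tail chunk
      by_cases hend : (sL.length : Int) ≤ st
      · rw [pyRange_pos_nil st _ k (by omega) hend, List.map_nil, emit]
        simp only [aFinalize, List.length_append]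
        rw [PySem.List.length_slice]
        simp only [PySem.List.clampIdx, cLen]
        split_ifs <;> push_cast <;> omega
      · have hend2 : st < (sL.length : Int) := by omega
        rw [pyRange_pos_cons st _ k (by omega) hend2,
          pyRange_pos_nil (st + k) _ k (by omega) (by omega), List.map_cons, List.map_nil]
        have htail : PySem.List.slice sL (some st) (some (st + k)) =
            PySem.List.slice sL (some st) (some (sL.length : Int)) :=
          slice_tail_eq sL st k h0 (by omega)
        have hlen : ((PySem.List.slice sL (some st) (some (sL.length : Int))).length : Int)
            = (sL.length : Int) - st := by
          rw [length_slice_tail sL st h0]; omega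
        have hne : prev ≠ PySem.List.slice sL (some st) (some (st + k)) := by
          rw [htail]
          intro h
          rcases hprev with h1 | h1
          · rw [← h] at hlen; rw [h1] at hlen; simp at hlen; omega
          · rw [← h] at hlen; omega
        simp only [emit]
        rw [if_neg hne, htail, cLen_one]
        simp only [aFinalize, List.length_append, cLen]
        push_cast
        rw [hlen]
        ring

-- ===== VERDICT (by name: the statement is the Claim_ definition above) =====
theorem get_compression_length_spec : Claim_equal_get_compression_length := by
  intro s k _ hk
  have hk1 : (1 : Int) ≤ k := hk
  show get_compression_length s k = get_compression_length_alt s k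
  simp only [get_compression_length, get_compression_length_alt]
  rw [aLoop_emit s.toList k hk1 (s.toList.length + 1) 0 [] [] 1 (le_refl 0) (by omega)
    (Or.inl rfl)]
  rw [bTotal_eq_emit]
  · simp
  · -- the head chunk, if any, is nonempty
    intro c hc
    by_cases hpos : (0 : Int) < (s.toList.length : Int)
    · rw [pyRange_pos_cons 0 _ k (by omega) hpos, List.map_cons, List.head?_cons] at hc
      simp only [Option.mem_def, Option.some.injEq] at hc
      subst hc
      intro hnil
      have hlc := congrArg List.length hnil
      rw [PySem.List.length_slice] at hlc
      simp only [PySem.List.clampIdx, List.length_nil] at hlc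
      split_ifs at hlc <;> omega
    · rw [pyRange_pos_nil 0 _ k (by omega) (by omega), List.map_nil] at hc
      simp at hc
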